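-- pv_equiv track=rewrite | github.com/dbcli/mycli | mycli/packages/completion_engine.py | _find_doubled_backticks
-- ===== SOURCE A (Python) =====
-- def _find_doubled_backticks(text: str) -> list[int]:
--     length = len(text)
--     doubled_backtick_positions: list[int] = []
--     backtick = '`'
--     two_backticks = backtick + backtick
--
--     if two_backticks not in text:
--         return doubled_backtick_positions
--
--     for index in range(0, length):
--         ch = text[index]
--         if ch != backtick:
--             index += 1
--             continue
--         if index + 1 < length and text[index + 1] == backtick:
--             doubled_backtick_positions.append(index)
--             doubled_backtick_positions.append(index + 1)
--             index += 2
--             continue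
--         index += 1
--
--     return doubled_backtick_positions
-- ===== SOURCE B (Python) =====
-- def _find_doubled_backticks(text: str) -> list[int]:
--     positions = []
--     pos = text.find('``')
--     while pos != -1:
--         positions.append(pos)
--         positions.append(pos + 1)
--         pos = text.find('``', pos + 1)
--     return positions
-- ===== Notes on version B (the rewrite author's own statement) =====
-- stated objective: simpler
-- what changed: Replaces the per-character index loop (with its redundant '`` in text' guard and dead 'index += k' statements) by a str.find substring-search loop that jumps from match to match, advancing by pos+1 to keep overlapping pairs.
import Mathlib
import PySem

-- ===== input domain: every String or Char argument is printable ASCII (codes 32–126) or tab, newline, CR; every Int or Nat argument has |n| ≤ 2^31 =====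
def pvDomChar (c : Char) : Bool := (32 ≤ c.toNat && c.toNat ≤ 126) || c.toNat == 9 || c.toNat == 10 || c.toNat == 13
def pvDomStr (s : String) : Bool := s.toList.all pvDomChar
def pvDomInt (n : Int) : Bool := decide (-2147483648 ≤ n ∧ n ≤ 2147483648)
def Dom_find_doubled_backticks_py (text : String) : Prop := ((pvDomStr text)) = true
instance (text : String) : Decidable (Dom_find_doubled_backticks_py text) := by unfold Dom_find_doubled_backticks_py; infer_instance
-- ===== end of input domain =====

-- B replaces A's per-character index loop (with its redundant guard and dead `index += k`
-- statements) by a str.find substring-search loop that jumps from match to match (objective: simpler).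


-- ===== PORT A =====
-- Python's `text[index]` is always in range inside the loop, so `.getD ' '` is exact here.
def find_doubled_backticks_py (text : String) : List Int :=
  let length : Int := PySem.Str.len text
  let doubled_backtick_positions : List Int := []
  let backtick : String := "`"
  let two_backticks : String := backtick ++ backtick
  if PySem.Str.isIn two_backticks text = false then
    doubled_backtick_positions
  else
    (PySem.List.pyRange 0 length 1).foldl (fun acc index =>
      if (PySem.Str.pyGet? text index).getD ' ' ≠ '`' then acc
      else if index + 1 < length ∧ (PySem.Str.pyGet? text (index + 1)).getD ' ' = '`' then
        acc ++ [index, index + 1]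
      else acc) doubled_backtick_positions

-- ===== PORT B =====
-- the `while pos != -1` loop of Source B; fuel = len(text)+1 is a totality guard only
-- (pos strictly increases and stays below len(text), so the fuel is never exhausted)
def bFindLoop (cs : List Char) : Nat → Int → List Int → List Int
  | 0, _, acc => acc
  | fuel + 1, pos, acc =>
    if pos = -1 then acc
    else bFindLoop cs fuel (PySem.Chars.findFrom cs ['`', '`'] (pos + 1) none) (acc ++ [pos, pos + 1])

def find_doubled_backticks_py_alt (text : String) : List Int :=
  bFindLoop text.toList (text.toList.length + 1) (PySem.Str.find text "``") []

-- ===== PRECONDITION & SPEC =====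
def Spec_find_doubled_backticks_py (text : String) (out : List Int) : Prop := out = find_doubled_backticks_py_alt text
instance (text : String) (out : List Int) : Decidable (Spec_find_doubled_backticks_py text out) := by unfold Spec_find_doubled_backticks_py; infer_instance

-- ===== CLAIM (what is proved, stated in full; the proofs are below) =====
def Claim_equal_find_doubled_backticks_py : Prop := ∀ (text : String), Dom_find_doubled_backticks_py text → Spec_find_doubled_backticks_py text (find_doubled_backticks_py text)

-- ===== LEMMAS AND PROOFS =====

/-- Reference result: for each position `i` with a backtick at `i` and `i+1`,
emit `[i, i+1]`; overlapping matches included. -/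
def pairsAux : List Char → Int → List Int
  | [], _ => []
  | [_], _ => []
  | a :: b :: rest, i =>
    (if a = '`' ∧ b = '`' then [i, i + 1] else []) ++ pairsAux (b :: rest) (i + 1)

lemma pairsAux_cons (a : Char) (cs : List Char) (i : Int) :
    pairsAux (a :: cs) i
      = (if a = '`' ∧ cs.head? = some '`' then [i, i + 1] else []) ++ pairsAux cs (i + 1) := by
  cases cs <;> simp [pairsAux]

lemma prefix_two_iff (a : Char) (cs : List Char) :
    (['`', '`'] <+: a :: cs) ↔ a = '`' ∧ cs.head? = some '`' := by
  cases cs <;> simp [List.cons_prefix_cons, eq_comm]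

lemma drop_succ_of_drop_cons {full cs : List Char} {a : Char} {k : Nat}
    (hd : full.drop k = a :: cs) : full.drop (k + 1) = cs := by
  have h := congrArg (List.drop 1) hd
  simpa [List.drop_drop, Nat.add_comm] using h

lemma pairsAux_eq_nil (cs : List Char) (i : Int)
    (h : ∀ t, ¬ (['`', '`'] <+: cs.drop t)) : pairsAux cs i = [] := by
  induction cs generalizing i with
  | nil => simp [pairsAux]
  | cons a cs ih =>
    rw [pairsAux_cons]
    have h0 := h 0
    rw [List.drop_zero, prefix_two_iff] at h0
    simp only [if_neg h0, List.nil_append]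
    exact ih (i + 1) (fun t => by simpa using h (t + 1))

lemma pairsAux_skip (full : List Char) (p k : Nat) (hpk : p ≤ k)
    (h : ∀ t, p ≤ t → t < k → ¬ (['`', '`'] <+: full.drop t)) :
    pairsAux (full.drop p) (p : Int) = pairsAux (full.drop k) (k : Int) := by
  induction k, hpk using Nat.le_induction with
  | base => rfl
  | succ k hpk ih =>
    rw [ih (fun t ht1 ht2 => h t ht1 (by omega))]
    rcases hd : full.drop k with _ | ⟨a, cs⟩
    · have hnil : full.drop (k + 1) = [] := by
        have h1 := congrArg (List.drop 1) hd
        simpa [List.drop_drop, Nat.add_comm] using h1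
      simp [hnil, pairsAux]
    · have hcond : ¬ (a = '`' ∧ cs.head? = some '`') := by
        rw [← prefix_two_iff, ← hd]
        exact h k hpk (by omega)
      rw [pairsAux_cons, if_neg hcond, List.nil_append, drop_succ_of_drop_cons hd]
      norm_cast
  
lemma bLoop_eq (cs : List Char) (p : Nat) (hp : p ≤ cs.length) (fuel : Nat)
    (hf : cs.length + 1 - p ≤ fuel) (acc : List Int) :
    bFindLoop cs fuel (PySem.Chars.findFrom cs ['`', '`'] (p : Int) none) acc
      = acc ++ pairsAux (cs.drop p) (p : Int) := by
  induction fuel generalizing p acc with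
  | zero => omega
  | succ fuel ih =>
    by_cases hq : PySem.Chars.findFrom cs ['`', '`'] (p : Int) none = -1
    · have hni : ¬ (['`', '`'] <:+: cs.drop p) :=
        (PySem.Chars.findFrom_natCast_eq_neg_one_iff cs _ p hp).mp hq
      have hno : ∀ t, ¬ (['`', '`'] <+: (cs.drop p).drop t) := by
        intro t hpre
        refine hni ?_
        rw [← (PySem.Chars.isIn_iff_infix _ _), ← PySem.Chars.exists_prefix_drop_iff_isIn]
        exact ⟨t, hpre⟩
      rw [pairsAux_eq_nil _ _ hno, List.append_nil, hq]
      simp [bFindLoop]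
    · obtain ⟨hpq, hpre, hmin⟩ := PySem.Chars.findFrom_natCast_spec cs ['`', '`'] p hp hq
      set q := PySem.Chars.findFrom cs ['`', '`'] (p : Int) none with hqdef
      have hq0 : 0 ≤ q := le_trans (by positivity) hpq
      have hqq : ((q.toNat : Nat) : Int) = q := Int.toNat_of_nonneg hq0
      have hpqn : p ≤ q.toNat := by omega
      have hlen2 : q.toNat + 2 ≤ cs.length := by
        have hl := hpre.length_le
        simp [List.length_drop] at hl
        omega
      have hskip : pairsAux (cs.drop p) (p : Int) = pairsAux (cs.drop q.toNat) (q.toNat : Int) :=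
        pairsAux_skip cs p q.toNat hpqn (fun t ht1 ht2 => hmin t ht1 ht2)
      rcases hd : cs.drop q.toNat with _ | ⟨a, cs'⟩
      · rw [hd] at hpre; simp at hpre
      · have hcond : a = '`' ∧ cs'.head? = some '`' := by
          rw [← prefix_two_iff, ← hd]; exact hpre
        have hstep : pairsAux (cs.drop q.toNat) (q.toNat : Int)
            = [(q.toNat : Int), (q.toNat : Int) + 1]
              ++ pairsAux (cs.drop (q.toNat + 1)) ((q.toNat : Int) + 1) := by
          rw [hd, pairsAux_cons, if_pos hcond, drop_succ_of_drop_cons hd]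
        have hcast : ((q.toNat + 1 : Nat) : Int) = q + 1 := by omega
        have hrec := ih (q.toNat + 1) (by omega) (by omega) (acc ++ [q, q + 1])
        rw [hcast] at hrec
        rw [bFindLoop, if_neg hq, hrec, hskip, hstep, hqq]
        simp [List.append_assoc]

lemma loopA (cs : List Char) (p : Nat) (hp : p ≤ cs.length) (acc : List Int) :
    (PySem.List.pyRange (p : Int) (cs.length : Int) 1).foldl
      (fun acc index =>
        if (PySem.List.pyGet? cs index).getD ' ' ≠ '`' then acc
        else if index + 1 < (cs.length : Int) ∧ (PySem.List.pyGet? cs (index + 1)).getD ' ' = '`' then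
          acc ++ [index, index + 1]
        else acc) acc
      = acc ++ pairsAux (cs.drop p) (p : Int) := by
  induction hn : cs.length - p generalizing p acc with
  | zero =>
    have hpe : p = cs.length := by omega
    rw [hpe, PySem.List.pyRange_one_eq_nil (le_refl _), List.foldl_nil, List.drop_length]
    simp [pairsAux]
  | succ n ih =>
    have hplt : p < cs.length := by omega
    have hget : PySem.List.pyGet? cs (p : Int) = some (cs[p]'hplt) := by
      rw [PySem.List.pyGet?_natCast]
      exact List.getElem?_eq_getElem hplt
    have hcast : (p : Int) + 1 = ((p + 1 : Nat) : Int) := by push_cast; ring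
    have hget2 : PySem.List.pyGet? cs ((p : Int) + 1) = cs[p + 1]? := by
      rw [hcast, PySem.List.pyGet?_natCast]
    have hdropp : cs.drop p = cs[p]'hplt :: cs.drop (p + 1) := List.drop_eq_getElem_cons hplt
    have hhead : (cs.drop (p + 1)).head? = cs[p + 1]? := List.head?_drop
    have iha := fun acc => ih (p + 1) (by omega) acc (by omega)
    rw [PySem.List.pyRange_one_cons (by exact_mod_cast hplt), List.foldl_cons]
    by_cases hch : cs[p]'hplt = '`'
    · by_cases h2 : p + 1 < cs.length
      · have h2' : (p : Int) + 1 < (cs.length : Int) := by exact_mod_cast h2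
        have hget2' : cs[p + 1]? = some (cs[p + 1]'h2) := List.getElem?_eq_getElem h2
        by_cases hch2 : cs[p + 1]'h2 = '`'
        · simp only [hget, hget2, Option.getD_some]
          rw [if_neg (by simp [hch]),
            if_pos ⟨h2', by rw [hget2', Option.getD_some]; exact hch2⟩]
          rw [hcast, iha, hdropp, pairsAux_cons,
            if_pos ⟨hch, by rw [hhead, hget2']; exact congrArg some hch2⟩, ← hcast]
          simp [List.append_assoc]
        · simp only [hget, hget2, Option.getD_some]
          rw [if_neg (by simp [hch]), if_neg (by simp [hget2', hch2])]
          rw [hcast, iha, hdropp, pairsAux_cons, if_neg (by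
            rintro ⟨-, hc⟩
            rw [hhead, hget2'] at hc
            exact hch2 (Option.some.inj hc)), ← hcast]
          simp
      · have hnone : cs[p + 1]? = none := List.getElem?_eq_none (by omega)
        simp only [hget, hget2, Option.getD_some]
        rw [if_neg (by simp [hch]), if_neg (by simp [hnone])]
        rw [hcast, iha, hdropp, pairsAux_cons, if_neg (by
          rintro ⟨-, hc⟩
          rw [hhead, hnone] at hc
          cases hc), ← hcast]
        simp
    · simp only [hget, hget2, Option.getD_some]
      rw [if_pos hch]
      rw [hcast, iha, hdropp, pairsAux_cons, if_neg (by rintro ⟨hc, -⟩; exact hch hc), ← hcast]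
      simp

-- ===== VERDICT (by name: the statement is the Claim_ definition above) =====
theorem find_doubled_backticks_py_spec : Claim_equal_find_doubled_backticks_py := by
  intro text _
  unfold Spec_find_doubled_backticks_py find_doubled_backticks_py find_doubled_backticks_py_alt
  have htb : ("`" : String) ++ "`" = "``" := rfl
  simp only [htb, PySem.Str.pyGet?_eq, PySem.Chars.pyGet?_eq_listPyGet?, PySem.Str.len_eq]
  by_cases hin : PySem.Str.isIn "``" text = false
  · rw [if_pos hin]
    have hni : ¬ (['`', '`'] <:+: text.toList) := by
      intro hinf
      have ht : PySem.Str.isIn "``" text = true :=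
        (PySem.Str.isIn_iff_infix "``" text).mpr (by simpa using hinf)
      rw [ht] at hin
      cases hin
    have hfind : PySem.Str.find text "``" = -1 := by
      rw [PySem.Str.find_eq_neg_one_iff]
      simpa using hni
    rw [hfind]
    simp [bFindLoop]
  · rw [if_neg hin]
    have h0 := loopA text.toList 0 (Nat.zero_le _) []
    simp only [Nat.cast_zero, List.drop_zero, List.nil_append] at h0
    have hfind : PySem.Str.find text "``"
        = PySem.Chars.findFrom text.toList ['`', '`'] ((0 : Nat) : Int) none := by
      simp [PySem.Chars.findFrom_zero]
    have hbl := bLoop_eq text.toList 0 (Nat.zero_le _) (text.toList.length + 1) (by omega) []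
    refine h0.trans ?_
    rw [hfind, hbl]
    simp
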